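-- pv_equiv track=rewrite | github.com/AstroLis/test-maker | tree_bool_tm.py | Filter2Forms
-- ===== SOURCE A (Python) =====
-- def CalcNFromForms123(forms123):
--  r=0
--  for i in forms123:
--   r=r|i[0]
--  return r
--
-- def Filter2Forms(forms123,N):
--   rez=forms123
--   for f in forms123:
--    if(f[1]==2):
--     ff=[f2 for f2 in forms123 if not f2==f]
--     if CalcNFromForms123(ff)==N:
--      rez=Filter2Forms(ff,N)
--      break
--   return rez
-- ===== SOURCE B (Python) =====
-- def Filter2Forms(forms123, N):
--     cur = forms123
--     while True:
--         # distinct forms in first-occurrence order (removal predicate depends only on the form's value)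
--         uniq = []
--         seen = set()
--         for f in cur:
--             t = tuple(f)
--             if t not in seen:
--                 seen.add(t)
--                 uniq.append(f)
--         # suffix ORs of the distinct forms' bit masks
--         suf = [0] * (len(uniq) + 1)
--         for i in range(len(uniq) - 1, -1, -1):
--             suf[i] = suf[i + 1] | uniq[i][0]
--         # first removable type-2 form: coverage without it = prefix OR | suffix OR
--         pre = 0
--         chosen = None
--         for i in range(len(uniq)):
--             f = uniq[i]
--             if f[1] == 2 and (pre | suf[i + 1]) == N:
--                 chosen = f
--                 break
--             pre = pre | f[0]
--         if chosen is None: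
--             return cur
--         cur = [g for g in cur if g != chosen]
-- ===== Notes on version B (the rewrite author's own statement) =====
-- stated objective: alternative
-- what changed: Replaces the recursive rescan (which rebuilds the list and recomputes the full OR for every candidate at every level) by an iterative loop that deduplicates the forms via a hash set once per round and tests each candidate's removability in O(1) using precomputed prefix/suffix OR arrays over the distinct forms; worst-case O(n^2) instead of O(n^3), though not measurably faster on the random timing inputs.
import Mathlib
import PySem

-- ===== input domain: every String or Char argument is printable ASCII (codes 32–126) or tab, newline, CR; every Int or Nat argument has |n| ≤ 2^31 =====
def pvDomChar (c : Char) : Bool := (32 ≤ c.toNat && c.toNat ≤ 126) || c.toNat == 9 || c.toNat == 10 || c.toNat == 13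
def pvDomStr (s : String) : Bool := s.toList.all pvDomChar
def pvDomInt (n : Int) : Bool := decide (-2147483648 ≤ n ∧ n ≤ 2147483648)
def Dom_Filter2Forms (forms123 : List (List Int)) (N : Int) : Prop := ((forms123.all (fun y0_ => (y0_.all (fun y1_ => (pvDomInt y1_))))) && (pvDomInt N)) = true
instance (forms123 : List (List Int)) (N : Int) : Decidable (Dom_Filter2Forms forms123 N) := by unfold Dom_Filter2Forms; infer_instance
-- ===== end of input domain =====

-- B replaces A's recursive rescan (rebuild the list and recompute the full OR for every
-- candidate at every level) by an iterative loop that deduplicates the forms once per round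
-- and tests each candidate with precomputed prefix/suffix ORs over the distinct forms.

-- ===== PORT A =====
def CalcNFromForms123 (forms123 : List (List Int)) : Int :=
  forms123.foldl (fun r i => PySem.Int.bor r ((PySem.List.pyGet? i 0).getD 0)) 0

-- termination helper for the port (cited by decreasing_by)
theorem pvFilterNe_length_lt (f : List Int) (l : List (List Int)) (hf : f ∈ l) :
    (l.filter (fun f2 => !(f2 == f))).length < l.length := by
  induction l with
  | nil => cases hf
  | cons a l ih =>
    rcases List.mem_cons.1 hf with h | h
    · subst h
      simp only [List.filter_cons, beq_self_eq_true, Bool.not_true]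
      exact Nat.lt_succ_of_le (List.length_filter_le _ _)
    · simp only [List.filter_cons, List.length_cons]
      split
      · exact Nat.succ_lt_succ (ih h)
      · exact Nat.lt_succ_of_lt (ih h)

def Filter2Forms (forms123 : List (List Int)) (N : Int) : List (List Int) :=
  match h : forms123.find? (fun f =>
      ((PySem.List.pyGet? f 1) == some 2) &&
      (CalcNFromForms123 (forms123.filter (fun f2 => !(f2 == f))) == N)) with
  | some f => Filter2Forms (forms123.filter (fun f2 => !(f2 == f))) N
  | none => forms123
termination_by forms123.length
decreasing_by
  simp only [List.length_unattach, ← List.countP_eq_length_filter]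
  rw [@List.countP_attach _ forms123 (fun f2 => !f2 == f)]
  have h2 := pvFilterNe_length_lt f forms123 (List.mem_of_find?_eq_some h)
  rw [← List.countP_eq_length_filter] at h2
  exact h2

-- ===== PORT B =====
-- uniq: distinct forms in first-occurrence order (loop over cur with a seen-set)
def bDedup (cur : List (List Int)) : List (List Int) :=
  (cur.foldl
    (fun (st : List (List Int) × PySem.Set (List Int)) f =>
      if st.2.contains f then st else (st.1 ++ [f], st.2.add f))
    ([], PySem.Set.empty)).1

-- suffix ORs: suf[i] = suf[i+1] | vals[i], built back to front (length = len vals + 1)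
def bSufs (vals : List Int) : List Int :=
  vals.foldr (fun v acc => (PySem.Int.bor v (acc.headD 0)) :: acc) [0]

-- forward scan: first type-2 form whose removal keeps coverage N (pre | suf[i+1] test)
def bScan : List (List Int) → List Int → Int → Int → Option (List Int)
  | [], _, _, _ => none
  | f :: rest, sufs, pre, N =>
    if ((PySem.List.pyGet? f 1) == some 2) &&
       (PySem.Int.bor pre (sufs.headD 0) == N) then some f
    else bScan rest sufs.tail (PySem.Int.bor pre ((PySem.List.pyGet? f 0).getD 0)) N

theorem pvMemBDedupAux (l : List (List Int)) : ∀ (acc : List (List Int)) (s : PySem.Set (List Int)) (x : List Int),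
    x ∈ (l.foldl
      (fun (st : List (List Int) × PySem.Set (List Int)) f =>
        if st.2.contains f then st else (st.1 ++ [f], st.2.add f))
      (acc, s)).1 → x ∈ acc ∨ x ∈ l := by
  induction l with
  | nil => intro acc s x h; exact Or.inl h
  | cons f l ih =>
    intro acc s x h
    show x ∈ acc ∨ x ∈ f :: l
    rw [List.foldl_cons] at h
    by_cases hb : s.contains f
    · rw [if_pos hb] at h
      rcases ih acc s x h with h' | h'
      · exact Or.inl h'
      · exact Or.inr (List.mem_cons_of_mem _ h')
    · rw [if_neg hb] at h
      rcases ih (acc ++ [f]) (s.add f) x h with h' | h'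
      · rcases List.mem_append.1 h' with h'' | h''
        · exact Or.inl h''
        · rw [List.mem_singleton] at h''
          exact Or.inr (h'' ▸ List.mem_cons_self ..)
      · exact Or.inr (List.mem_cons_of_mem _ h')

theorem pvMemBDedup (cur : List (List Int)) (x : List Int) (h : x ∈ bDedup cur) : x ∈ cur := by
  rcases pvMemBDedupAux cur [] PySem.Set.empty x h with h' | h'
  · cases h'
  · exact h'

theorem pvBScanMem (l : List (List Int)) (sufs : List Int) (pre N : Int) (c : List Int)
    (h : bScan l sufs pre N = some c) : c ∈ l := by
  induction l generalizing sufs pre with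
  | nil => simp [bScan] at h
  | cons f rest ih =>
    rw [bScan] at h
    split at h
    · cases h; exact List.mem_cons_self ..
    · exact List.mem_cons_of_mem _ (ih _ _ h)

def Filter2Forms_alt (forms123 : List (List Int)) (N : Int) : List (List Int) :=
  let uniq := bDedup forms123
  match h : bScan uniq ((bSufs (uniq.map (fun f => (PySem.List.pyGet? f 0).getD 0))).tail) 0 N with
  | some c => Filter2Forms_alt (forms123.filter (fun g => !(g == c))) N
  | none => forms123
termination_by forms123.length
decreasing_by
  simp only [List.length_unattach, ← List.countP_eq_length_filter]
  rw [@List.countP_attach _ forms123 (fun g => !g == c)]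
  have h2 := pvFilterNe_length_lt c forms123 (pvMemBDedup forms123 c (pvBScanMem _ _ _ _ _ h))
  rw [← List.countP_eq_length_filter] at h2
  exact h2

-- ===== PRECONDITION & SPEC =====
-- Pre_ excludes exactly the inputs containing a form of length < 2: there Python A raises
-- IndexError (f[1] or i[0] on a too-short form); B raises there as well.
def Pre_Filter2Forms (forms123 : List (List Int)) (N : Int) : Prop :=
  ∀ f ∈ forms123, 2 ≤ f.length
instance (forms123 : List (List Int)) (N : Int) : Decidable (Pre_Filter2Forms forms123 N) := by
  unfold Pre_Filter2Forms; infer_instance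
def pvWitness_Filter2Forms : List (List Int) × Int := ([[1, 2], [3, 1], [3, 2]], 3)

def Spec_Filter2Forms (forms123 : List (List Int)) (N : Int) (out : List (List Int)) : Prop := out = Filter2Forms_alt forms123 N
instance (forms123 : List (List Int)) (N : Int) (out : List (List Int)) : Decidable (Spec_Filter2Forms forms123 N out) := by unfold Spec_Filter2Forms; infer_instance

-- ===== CLAIM (what is proved, stated in full; the proofs are below) =====
def Claim_equal_Filter2Forms : Prop := ∀ (forms123 : List (List Int)) (N : Int), Dom_Filter2Forms forms123 N → Pre_Filter2Forms forms123 N → Spec_Filter2Forms forms123 N (Filter2Forms forms123 N)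

-- ===== LEMMAS AND PROOFS =====

-- ---- bit-level groundwork for PySem.Int.bor ----
theorem pvLdiffZero (m : Nat) : Nat.ldiff 0 m = 0 := by
  apply Nat.eq_of_testBit_eq; intro i; simp [Nat.testBit_ldiff]

theorem pvAndMod2 (n m : Nat) : (n &&& m) % 2 = if n % 2 = 1 ∧ m % 2 = 1 then 1 else 0 := by
  by_cases hc : n % 2 = 1 ∧ m % 2 = 1
  · simp [hc, Nat.and_mod_two_eq_one.mpr hc]
  · simp [hc]
    rcases Nat.mod_two_eq_zero_or_one (n &&& m) with hx | hx
    · exact hx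
    · exact absurd (Nat.and_mod_two_eq_one.mp hx) hc

theorem pvLdiffMod2Iff (n m : Nat) : n.ldiff m % 2 = 1 ↔ (n % 2 = 1 ∧ m % 2 = 0) := by
  have h := Nat.testBit_ldiff n m 0
  simp only [Nat.testBit_zero] at h
  rw [← decide_eq_true_iff (p := n.ldiff m % 2 = 1), h]
  simp only [Bool.and_eq_true, decide_eq_true_iff, Bool.not_eq_true', decide_eq_false_iff_not]
  constructor
  · rintro ⟨h1, h2⟩; exact ⟨h1, by omega⟩
  · rintro ⟨h1, h2⟩; exact ⟨h1, by omega⟩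

theorem pvLdiffMod2 (n m : Nat) : n.ldiff m % 2 = if n % 2 = 1 ∧ m % 2 = 0 then 1 else 0 := by
  by_cases hc : n % 2 = 1 ∧ m % 2 = 0
  · simp [hc, (pvLdiffMod2Iff n m).mpr hc]
  · simp [hc]
    rcases Nat.mod_two_eq_zero_or_one (n.ldiff m) with hx | hx
    · exact hx
    · exact absurd ((pvLdiffMod2Iff n m).mp hx) hc

theorem pvLdiffAddAnd (n m : Nat) : n.ldiff m + (n &&& m) = n := by
  induction n using Nat.strong_induction_on generalizing m with
  | _ n ih =>
    by_cases h0 : n = 0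
    · simp [h0, pvLdiffZero]
    · have hlt : n / 2 < n := Nat.div_lt_self (Nat.pos_of_ne_zero h0) (by norm_num)
      have IH := ih (n / 2) hlt (m / 2)
      have hA2 : (n.ldiff m) / 2 = (n / 2).ldiff (m / 2) := by
        apply Nat.eq_of_testBit_eq; intro i
        simp [Nat.testBit_div_two, Nat.testBit_ldiff]
      have hB2 : (n &&& m) / 2 = (n / 2) &&& (m / 2) := Nat.and_div_two
      have hA0 := pvLdiffMod2 n m
      have hB0 := pvAndMod2 n m
      set a := n.ldiff m with ha
      set b := n &&& m with hb
      set A := (n / 2).ldiff (m / 2) with hA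
      set B := (n / 2) &&& (m / 2) with hB
      rcases Nat.mod_two_eq_zero_or_one n with hn | hn <;>
        rcases Nat.mod_two_eq_zero_or_one m with hm | hm <;>
        simp [hn, hm] at hA0 hB0 <;> omega

theorem pvIntExt (a b : Int) (h : ∀ i, a.testBit i = b.testBit i) : a = b := by
  cases a with
  | ofNat m =>
    cases b with
    | ofNat n =>
      have : m = n := Nat.eq_of_testBit_eq (fun i => by simpa [Int.testBit] using h i)
      simp [this]
    | negSucc n =>
      exfalso
      have hi := h (m + n)
      simp only [Int.testBit] at hi
      have hm : m.testBit (m + n) = false :=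
        Nat.testBit_eq_false_of_lt (lt_of_lt_of_le (Nat.lt_two_pow_self) (Nat.pow_le_pow_right (by norm_num) (Nat.le_add_right m n)))
      have hn : n.testBit (m + n) = false :=
        Nat.testBit_eq_false_of_lt (lt_of_lt_of_le (Nat.lt_two_pow_self) (Nat.pow_le_pow_right (by norm_num) (Nat.le_add_left n m)))
      rw [hm, hn] at hi
      simp at hi
  | negSucc m =>
    cases b with
    | ofNat n =>
      exfalso
      have hi := h (m + n)
      simp only [Int.testBit] at hi
      have hm : m.testBit (m + n) = false :=
        Nat.testBit_eq_false_of_lt (lt_of_lt_of_le (Nat.lt_two_pow_self) (Nat.pow_le_pow_right (by norm_num) (Nat.le_add_right m n)))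
      have hn : n.testBit (m + n) = false :=
        Nat.testBit_eq_false_of_lt (lt_of_lt_of_le (Nat.lt_two_pow_self) (Nat.pow_le_pow_right (by norm_num) (Nat.le_add_left n m)))
      rw [hm, hn] at hi
      simp at hi
    | negSucc n =>
      have : m = n := Nat.eq_of_testBit_eq (fun i => by
        have hi := h i
        simp only [Int.testBit] at hi
        exact Bool.not_inj hi)
      simp [this]

theorem pvNegSubOne (k : Nat) : -(k : Int) - 1 = Int.negSucc k := by
  rw [Int.negSucc_eq]; omega

theorem pvTestBitBor (a b : Int) (i : Nat) :
    (PySem.Int.bor a b).testBit i = (a.testBit i || b.testBit i) := by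
  have hsub : ∀ p q : Nat, p - (p &&& q) = p.ldiff q := fun p q => by
    have := pvLdiffAddAnd p q; omega
  cases a with
  | ofNat m =>
    cases b with
    | ofNat n =>
      simp [PySem.Int.bor, Int.testBit, Nat.testBit_or]
    | negSucc n =>
      have h1 : (0 : Int) ≤ Int.ofNat m := Int.natCast_nonneg m
      have h2 : ¬ (0 : Int) ≤ Int.negSucc n := by simp [Int.negSucc_eq]; omega
      simp only [PySem.Int.bor, h1, h2, if_true, if_false]
      have h3 : (-(Int.negSucc n) - 1).toNat = n := by rw [Int.negSucc_eq]; omega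
      have h4 : (Int.ofNat m).toNat = m := rfl
      rw [h3, h4, hsub, pvNegSubOne]
      simp only [Int.testBit, Nat.testBit_ldiff]
      cases hm : m.testBit i <;> cases hn : n.testBit i <;> simp
  | negSucc m =>
    cases b with
    | ofNat n =>
      have h1 : ¬ (0 : Int) ≤ Int.negSucc m := by simp [Int.negSucc_eq]; omega
      have h2 : (0 : Int) ≤ Int.ofNat n := Int.natCast_nonneg n
      simp only [PySem.Int.bor, h1, h2, if_true, if_false]
      have h3 : (-(Int.negSucc m) - 1).toNat = m := by rw [Int.negSucc_eq]; omega
      have h4 : (Int.ofNat n).toNat = n := rfl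
      rw [h3, h4, hsub, pvNegSubOne]
      simp only [Int.testBit, Nat.testBit_ldiff]
      cases hm : m.testBit i <;> cases hn : n.testBit i <;> simp
    | negSucc n =>
      have h1 : ¬ (0 : Int) ≤ Int.negSucc m := by simp [Int.negSucc_eq]; omega
      have h2 : ¬ (0 : Int) ≤ Int.negSucc n := by simp [Int.negSucc_eq]; omega
      simp only [PySem.Int.bor, h1, h2, if_false]
      have h3 : (-(Int.negSucc m) - 1).toNat = m := by rw [Int.negSucc_eq]; omega
      have h4 : (-(Int.negSucc n) - 1).toNat = n := by rw [Int.negSucc_eq]; omega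
      rw [h3, h4, pvNegSubOne]
      simp only [Int.testBit, Nat.testBit_and]
      cases hm : m.testBit i <;> cases hn : n.testBit i <;> simp

theorem pvBorAssoc (a b c : Int) :
    PySem.Int.bor (PySem.Int.bor a b) c = PySem.Int.bor a (PySem.Int.bor b c) := by
  apply pvIntExt; intro i; simp [pvTestBitBor, Bool.or_assoc]

theorem pvBorSelf (a : Int) : PySem.Int.bor a a = a := by
  apply pvIntExt; intro i; simp [pvTestBitBor]

theorem pvZeroBor (a : Int) : PySem.Int.bor 0 a = a := by
  rw [PySem.Int.bor_comm]; exact PySem.Int.bor_zero a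

-- ---- OR over a list of values ----
def orV (l : List Int) : Int := l.foldr PySem.Int.bor 0

def pvVals (l : List (List Int)) : List Int := l.map (fun f => (PySem.List.pyGet? f 0).getD 0)

theorem pvFoldlBor (l : List Int) (z : Int) :
    l.foldl PySem.Int.bor z = PySem.Int.bor z (orV l) := by
  induction l generalizing z with
  | nil => simp [orV, PySem.Int.bor_zero]
  | cons v l ih =>
    show (l.foldl PySem.Int.bor (PySem.Int.bor z v)) = _
    rw [ih, pvBorAssoc]
    rfl

theorem pvCalcN_eq_orV (l : List (List Int)) : CalcNFromForms123 l = orV (pvVals l) := by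
  unfold CalcNFromForms123 pvVals
  rw [← List.foldl_map (f := fun f => (PySem.List.pyGet? f 0).getD 0) (g := PySem.Int.bor)]
  rw [pvFoldlBor, pvZeroBor]

theorem pvBorMemAbsorb (a : Int) (l : List Int) (h : a ∈ l) : PySem.Int.bor a (orV l) = orV l := by
  induction l with
  | nil => cases h
  | cons b l ih =>
    show PySem.Int.bor a (PySem.Int.bor b (orV l)) = PySem.Int.bor b (orV l)
    rcases List.mem_cons.1 h with h' | h'
    · subst h'
      rw [← pvBorAssoc, pvBorSelf]
    · rw [← pvBorAssoc, PySem.Int.bor_comm a b, pvBorAssoc, ih h']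

theorem pvOrVSubset (l1 l2 : List Int) (h : ∀ x ∈ l1, x ∈ l2) :
    PySem.Int.bor (orV l2) (orV l1) = orV l2 := by
  induction l1 with
  | nil => exact PySem.Int.bor_zero _
  | cons a l1 ih =>
    show PySem.Int.bor (orV l2) (PySem.Int.bor a (orV l1)) = orV l2
    rw [← pvBorAssoc, PySem.Int.bor_comm (orV l2) a, pvBorAssoc,
      ih (fun x hx => h x (List.mem_cons_of_mem _ hx)),
      pvBorMemAbsorb a l2 (h a (List.mem_cons_self ..))]

theorem pvOrVMemIff (l1 l2 : List Int) (h : ∀ x, x ∈ l1 ↔ x ∈ l2) : orV l1 = orV l2 := by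
  have h1 := pvOrVSubset l1 l2 (fun x hx => (h x).1 hx)
  have h2 := pvOrVSubset l2 l1 (fun x hx => (h x).2 hx)
  rw [PySem.Int.bor_comm] at h2
  rw [← h1, h2]

-- ---- dedup characterization ----
def dGo (s : PySem.Set (List Int)) : List (List Int) → List (List Int)
  | [] => []
  | f :: l => if s.contains f then dGo s l else f :: dGo (s.add f) l

theorem pvContainsIff (s : PySem.Set (List Int)) (x : List Int) :
    s.contains x = true ↔ x ∈ s := by
  simp [PySem.Set.contains]

theorem pvFoldDedup (l : List (List Int)) : ∀ (acc : List (List Int)) (s : PySem.Set (List Int)),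
    (l.foldl
      (fun (st : List (List Int) × PySem.Set (List Int)) f =>
        if st.2.contains f then st else (st.1 ++ [f], st.2.add f))
      (acc, s)).1 = acc ++ dGo s l := by
  induction l with
  | nil => intro acc s; simp [dGo]
  | cons f l ih =>
    intro acc s
    show (l.foldl _ (if s.contains f = true then (acc, s) else (acc ++ [f], s.add f))).1 = _
    rw [dGo]
    cases hb : s.contains f
    · rw [if_neg (by simp), if_neg (by simp),
        ih (acc ++ [f]) (s.add f), List.append_assoc]
      rfl
    · rw [if_pos rfl, if_pos rfl]
      exact ih acc s

theorem pvBDedup_eq_dGo (cur : List (List Int)) : bDedup cur = dGo PySem.Set.empty cur := by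
  unfold bDedup
  rw [pvFoldDedup cur [] PySem.Set.empty]
  rfl

theorem pvMemDGo (l : List (List Int)) (s : PySem.Set (List Int)) (x : List Int) :
    x ∈ dGo s l ↔ (x ∈ l ∧ x ∉ s) := by
  induction l generalizing s with
  | nil => simp [dGo]
  | cons f l ih =>
    rw [dGo]
    cases hb : s.contains f
    · have hf : f ∉ s := fun h => by rw [(pvContainsIff s f).2 h] at hb; cases hb
      rw [if_neg (by simp)]
      simp only [List.mem_cons, ih, PySem.Set.mem_add]
      constructor
      · rintro (h1 | ⟨h1, h2⟩)
        · exact ⟨Or.inl h1, h1 ▸ hf⟩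
        · exact ⟨Or.inr h1, fun hx => h2 (Or.inl hx)⟩
      · rintro ⟨h1 | h1, h2⟩
        · exact Or.inl h1
        · by_cases hx : x = f
          · exact Or.inl hx
          · refine Or.inr ⟨h1, fun hmem => ?_⟩
            rcases hmem with hmem | hmem
            · exact h2 hmem
            · exact hx hmem
    · have hf : f ∈ s := (pvContainsIff s f).1 hb
      rw [if_pos rfl]
      rw [ih]
      simp only [List.mem_cons]
      constructor
      · rintro ⟨h1, h2⟩; exact ⟨Or.inr h1, h2⟩
      · rintro ⟨h1 | h1, h2⟩
        · exact absurd (h1 ▸ hf) h2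
        · exact ⟨h1, h2⟩

theorem pvNodupDGo (l : List (List Int)) (s : PySem.Set (List Int)) : (dGo s l).Nodup := by
  induction l generalizing s with
  | nil => simp [dGo]
  | cons f l ih =>
    rw [dGo]
    cases hb : s.contains f
    · rw [if_neg (by simp), List.nodup_cons]
      refine ⟨fun hmem => ?_, ih (s.add f)⟩
      have := (pvMemDGo l (s.add f) f).1 hmem
      exact this.2 ((PySem.Set.mem_add s f f).2 (Or.inr rfl))
    · rw [if_pos rfl]; exact ih s

theorem pvFindCongrMem (p q : List Int → Bool) (l : List (List Int))
    (h : ∀ a ∈ l, p a = q a) : l.find? p = l.find? q := by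
  induction l with
  | nil => rfl
  | cons a l ih =>
    rw [List.find?_cons, List.find?_cons, h a (List.mem_cons_self ..)]
    cases q a
    · exact ih (fun b hb => h b (List.mem_cons_of_mem _ hb))
    · rfl

theorem pvFindDGo (p : List Int → Bool) (l : List (List Int)) (s : PySem.Set (List Int))
    (hs : ∀ x, x ∈ s → p x = false) : l.find? p = (dGo s l).find? p := by
  induction l generalizing s with
  | nil => rfl
  | cons f l ih =>
    rw [dGo]
    cases hb : s.contains f
    · rw [if_neg (by simp)]
      rw [List.find?_cons, List.find?_cons]
      cases hpf : p f
      · refine ih (s.add f) (fun x hx => ?_)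
        rcases (PySem.Set.mem_add s f x).1 hx with h | h
        · exact hs x h
        · exact h ▸ hpf
      · rfl
    · have hpf : p f = false := hs f ((pvContainsIff s f).1 hb)
      rw [if_pos rfl]
      rw [List.find?_cons, hpf]
      exact ih s hs

theorem pvHeadDBSufs (vs : List Int) : (bSufs vs).headD 0 = orV vs := by
  induction vs with
  | nil => rfl
  | cons v vs ih =>
    show ((PySem.Int.bor v ((bSufs vs).headD 0)) :: bSufs vs).headD 0 = _
    rw [List.headD_cons, ih]
    rfl

theorem pvBSufsCons (v : Int) (vs : List Int) :
    bSufs (v :: vs) = (PySem.Int.bor v (orV vs)) :: bSufs vs := by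
  show (PySem.Int.bor v ((bSufs vs).headD 0)) :: bSufs vs = _
  rw [pvHeadDBSufs]

theorem pvBScanEq : ∀ (uniq : List (List Int)), uniq.Nodup → ∀ (pre N : Int),
    bScan uniq ((bSufs (pvVals uniq)).tail) pre N
    = uniq.find? (fun f =>
        ((PySem.List.pyGet? f 1) == some 2) &&
        (PySem.Int.bor pre (orV (pvVals (uniq.filter (fun g => !(g == f))))) == N)) := by
  intro uniq
  induction uniq with
  | nil => intro _ pre N; rfl
  | cons f rest ih =>
    intro hnd pre N
    obtain ⟨hf, hrest⟩ := List.nodup_cons.1 hnd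
    have hfil : (f :: rest).filter (fun g => !(g == f)) = rest := by
      rw [List.filter_cons]
      simp only [beq_self_eq_true, Bool.not_true, Bool.false_eq_true, if_false]
      refine List.filter_eq_self.2 (fun g hg => ?_)
      have hne : g ≠ f := fun he => hf (he ▸ hg)
      simp [hne]
    have hv : pvVals (f :: rest) = ((PySem.List.pyGet? f 0).getD 0) :: pvVals rest := rfl
    rw [hv, pvBSufsCons, List.tail_cons, bScan, pvHeadDBSufs, List.find?_cons]
    simp only [hfil]
    cases hc : (((PySem.List.pyGet? f 1) == some (2 : Int)) &&
        (PySem.Int.bor pre (orV (pvVals rest)) == N))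
    · rw [ih hrest (PySem.Int.bor pre ((PySem.List.pyGet? f 0).getD 0)) N]
      refine pvFindCongrMem _ _ rest (fun g hg => ?_)
      have hne : (f == g) = false := by
        have : f ≠ g := fun he => hf (he ▸ hg)
        simp [this]
      have hfil2 : (f :: rest).filter (fun g' => !(g' == g)) = f :: rest.filter (fun g' => !(g' == g)) := by
        rw [List.filter_cons, hne]
        rfl
      rw [hfil2]
      have hor : orV (pvVals (f :: rest.filter (fun g' => !(g' == g))))
          = PySem.Int.bor ((PySem.List.pyGet? f 0).getD 0) (orV (pvVals (rest.filter (fun g' => !(g' == g))))) := rfl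
      rw [hor, ← pvBorAssoc]
    · rfl

-- ---- main equivalence ----
theorem pvScrut (cur : List (List Int)) (N : Int) :
    cur.find? (fun f =>
      ((PySem.List.pyGet? f 1) == some 2) &&
      (CalcNFromForms123 (cur.filter (fun f2 => !(f2 == f))) == N))
    = bScan (bDedup cur) ((bSufs ((bDedup cur).map (fun f => (PySem.List.pyGet? f 0).getD 0))).tail) 0 N := by
  have hmemD : ∀ x, x ∈ bDedup cur ↔ x ∈ cur := by
    intro x
    rw [pvBDedup_eq_dGo, pvMemDGo]
    simp [PySem.Set.empty]
  have hstep1 : cur.find? (fun f =>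
      ((PySem.List.pyGet? f 1) == some 2) &&
      (CalcNFromForms123 (cur.filter (fun f2 => !(f2 == f))) == N))
    = cur.find? (fun f =>
      ((PySem.List.pyGet? f 1) == some 2) &&
      (PySem.Int.bor 0 (orV (pvVals ((bDedup cur).filter (fun g => !(g == f))))) == N)) := by
    refine pvFindCongrMem _ _ cur (fun f _ => ?_)
    have hor : CalcNFromForms123 (cur.filter (fun f2 => !(f2 == f)))
        = orV (pvVals ((bDedup cur).filter (fun g => !(g == f)))) := by
      rw [pvCalcN_eq_orV]
      refine pvOrVMemIff _ _ (fun x => ?_)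
      simp only [pvVals, List.mem_map, List.mem_filter, hmemD]
    rw [hor, pvZeroBor]
  have hstep2 : cur.find? (fun f =>
      ((PySem.List.pyGet? f 1) == some 2) &&
      (PySem.Int.bor 0 (orV (pvVals ((bDedup cur).filter (fun g => !(g == f))))) == N))
    = (bDedup cur).find? (fun f =>
      ((PySem.List.pyGet? f 1) == some 2) &&
      (PySem.Int.bor 0 (orV (pvVals ((bDedup cur).filter (fun g => !(g == f))))) == N)) := by
    rw [pvBDedup_eq_dGo]
    exact pvFindDGo _ cur PySem.Set.empty (fun x hx => by cases hx)
  have hnd : (bDedup cur).Nodup := by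
    rw [pvBDedup_eq_dGo]; exact pvNodupDGo cur PySem.Set.empty
  rw [hstep1, hstep2]
  show _ = bScan (bDedup cur) ((bSufs (pvVals (bDedup cur))).tail) 0 N
  exact (pvBScanEq (bDedup cur) hnd 0 N).symm

theorem pvMain (n : Nat) : ∀ (cur : List (List Int)) (N : Int), cur.length ≤ n →
    Filter2Forms cur N = Filter2Forms_alt cur N := by
  induction n with
  | zero =>
    intro cur N hlen
    have hnil : cur = [] := List.eq_nil_of_length_eq_zero (Nat.le_zero.1 hlen)
    subst hnil
    rw [Filter2Forms, Filter2Forms_alt]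
    rfl
  | succ n ih =>
    intro cur N hlen
    rw [Filter2Forms, Filter2Forms_alt]
    have hs := pvScrut cur N
    split
    · rename_i f hA
      rw [hA] at hs
      split
      · rename_i c hB
        rw [hB] at hs
        have hfc : f = c := by injection hs
        subst hfc
        have hc : f ∈ cur := pvMemBDedup cur f (pvBScanMem _ _ _ _ _ hB)
        have hlt := pvFilterNe_length_lt f cur hc
        exact ih (cur.filter (fun f2 => !(f2 == f))) N (by omega)
      · rename_i hB
        rw [hB] at hs
        cases hs
    · rename_i hA
      rw [hA] at hs
      split
      · rename_i c hB
        rw [hB] at hs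
        cases hs
      · rfl

-- ===== VERDICT (by name: the statement is the Claim_ definition above) =====
theorem Filter2Forms_spec : Claim_equal_Filter2Forms := by
  intro forms123 N _ _
  unfold Spec_Filter2Forms
  exact pvMain forms123.length forms123 N le_rfl
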